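-- pv_equiv track=rewrite | github.com/veekthor04/aapkapainter-tasks | cricket_score.py | cricket_score
-- ===== SOURCE A (Python) =====
-- def cricket_score(runs_array: list) -> str:
--     """This returns the individual scores of two players
--
--     Args:
--         runs_array (list): _description_
--
--     Returns:
--         str: _description_
--     """
--     p1_score = 0
--     p2_score = 0
--
--     is_p1_active = True
--
--     for run in runs_array:
--
--         if is_p1_active:
--             p1_score += run
--
--         else:
--             p2_score += run
--
--         if run % 2 != 0:
--             is_p1_active = not is_p1_active
--
--     return f"p1: {p1_score}, p2: {p2_score}"
-- ===== SOURCE B (Python) =====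
-- def _totals(turns):
--     # recursion on the turn list: turn 0 -> p1, turn 1 -> p2, alternating
--     if not turns:
--         return (0, 0)
--     rest_a, rest_b = _totals(turns[1:])
--     return (sum(turns[0]) + rest_b, rest_a)
--
--
-- def cricket_score(runs_array: list) -> str:
--     # pass 1: split the runs into "turns", closing a turn right after each odd run
--     turns = []
--     cur = []
--     for r in runs_array:
--         cur = cur + [r]
--         if r % 2 != 0:
--             turns.append(cur)
--             cur = []
--     if cur:
--         turns.append(cur)
--     # pass 2: assign whole turns alternately to the two players
--     p1, p2 = _totals(turns)
--     return f"p1: {p1}, p2: {p2}"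
-- ===== Notes on version B (the rewrite author's own statement) =====
-- stated objective: alternative
-- what changed: Instead of one toggle-flag loop, B first partitions the runs into turns (each closed right after an odd run) and then assigns whole turns alternately to the two players by recursion on the turn list.
import Mathlib
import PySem

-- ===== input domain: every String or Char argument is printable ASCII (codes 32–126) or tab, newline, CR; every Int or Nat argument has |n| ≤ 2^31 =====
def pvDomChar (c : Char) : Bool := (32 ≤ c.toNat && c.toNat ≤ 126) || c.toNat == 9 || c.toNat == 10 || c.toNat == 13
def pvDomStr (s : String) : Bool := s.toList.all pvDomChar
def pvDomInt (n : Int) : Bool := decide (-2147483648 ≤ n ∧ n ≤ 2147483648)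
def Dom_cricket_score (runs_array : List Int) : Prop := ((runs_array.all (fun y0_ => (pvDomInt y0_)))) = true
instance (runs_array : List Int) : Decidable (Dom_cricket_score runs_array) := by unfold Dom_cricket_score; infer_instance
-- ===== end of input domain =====

-- B replaces A's toggle-flag loop by a two-phase scheme (split runs into turns closed after each
-- odd run, then assign whole turns alternately); same O(n) cost, objective: alternative.


-- ===== PORT A =====
-- loop body of A's for-loop: state (p1_score, p2_score, is_p1_active)
def csStepA (st : Int × Int × Bool) (run : Int) : Int × Int × Bool :=
  let p1 := if st.2.2 then st.1 + run else st.1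
  let p2 := if st.2.2 then st.2.1 else st.2.1 + run
  let act := if PySem.Int.mod run 2 != 0 then !st.2.2 else st.2.2
  (p1, p2, act)

def cricket_score (runs_array : List Int) : String :=
  let st := runs_array.foldl csStepA (0, 0, true)
  "p1: " ++ PySem.Int.toStr st.1 ++ ", p2: " ++ PySem.Int.toStr st.2.1

-- ===== PORT B =====
-- Source B _totals: recursion on the turn list, turns go alternately to p1 / p2
def csAltTotals : List (List Int) → Int × Int
  | [] => (0, 0)
  | t :: ts =>
    let rest := csAltTotals ts
    (t.sum + rest.2, rest.1)

-- loop body of Source B's pass 1: state (turns, cur)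
def csStepB (st : List (List Int) × List Int) (r : Int) : List (List Int) × List Int :=
  let cur := st.2 ++ [r]
  if PySem.Int.mod r 2 != 0 then (st.1 ++ [cur], []) else (st.1, cur)

-- Source B: "if cur: turns.append(cur)" after the loop
def csFinish (st : List (List Int) × List Int) : List (List Int) :=
  if st.2 = [] then st.1 else st.1 ++ [st.2]

def cricket_score_alt (runs_array : List Int) : String :=
  let st := runs_array.foldl csStepB ([], [])
  let turns := csFinish st
  let t := csAltTotals turns
  "p1: " ++ PySem.Int.toStr t.1 ++ ", p2: " ++ PySem.Int.toStr t.2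

-- ===== PRECONDITION & SPEC =====
def Spec_cricket_score (runs_array : List Int) (out : String) : Prop := out = cricket_score_alt runs_array
instance (runs_array : List Int) (out : String) : Decidable (Spec_cricket_score runs_array out) := by unfold Spec_cricket_score; infer_instance

-- ===== CLAIM (what is proved, stated in full; the proofs are below) =====
def Claim_equal_cricket_score : Prop := ∀ (runs_array : List Int), Dom_cricket_score runs_array → Spec_cricket_score runs_array (cricket_score runs_array)

-- ===== LEMMAS AND PROOFS =====

-- reference spec: (p1-from-here, p2-from-here) with the current player active
def csScore : List Int → Int × Int
  | [] => (0, 0)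
  | r :: rs =>
    let q := csScore rs
    if PySem.Int.mod r 2 != 0 then (r + q.2, q.1) else (r + q.1, q.2)

theorem foldA_eq (rs : List Int) : ∀ (p1 p2 : Int) (act : Bool),
    ((rs.foldl csStepA (p1, p2, act)).1, (rs.foldl csStepA (p1, p2, act)).2.1)
      = (p1 + (if act then (csScore rs).1 else (csScore rs).2),
         p2 + (if act then (csScore rs).2 else (csScore rs).1)) := by
  induction rs with
  | nil => intro p1 p2 act; cases act <;> simp [csScore]
  | cons r rs ih =>
    intro p1 p2 act
    by_cases h : (PySem.Int.mod r 2 != 0) = true <;>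
      cases act <;>
        simp only [List.foldl_cons, csStepA, h, if_true, if_false, Bool.not_true,
          Bool.not_false, ite_true, ite_false, ih, csScore] <;>
        simp [h] <;> ring_nf

theorem totals_append (ts : List (List Int)) (c : List Int) :
    csAltTotals (ts ++ [c])
      = if ts.length % 2 = 0
          then ((csAltTotals ts).1 + c.sum, (csAltTotals ts).2)
          else ((csAltTotals ts).1, (csAltTotals ts).2 + c.sum) := by
  induction ts with
  | nil => simp [csAltTotals]
  | cons t ts ih =>
    simp only [List.cons_append, csAltTotals, ih]
    by_cases h0 : ts.length % 2 = 0
    · have h1 : (ts.length + 1) % 2 = 1 := by omega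
      have h2 : (1 + ts.length) % 2 = 1 := by omega
      simp [List.length_cons, h0, h1, h2]
    · have h1 : (ts.length + 1) % 2 = 0 := by omega
      have h2 : (1 + ts.length) % 2 = 0 := by omega
      simp [List.length_cons, h0, h1, h2] ; ring

theorem foldB_eq (rs : List Int) : ∀ (turns : List (List Int)) (cur : List Int),
    csAltTotals (csFinish (rs.foldl csStepB (turns, cur)))
      = ((csAltTotals turns).1
           + (if turns.length % 2 = 0 then cur.sum + (csScore rs).1 else (csScore rs).2),
         (csAltTotals turns).2
           + (if turns.length % 2 = 0 then (csScore rs).2 else cur.sum + (csScore rs).1)) := by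
  induction rs with
  | nil =>
    intro turns cur
    by_cases hc : cur = []
    · subst hc; simp [csScore, csFinish]
    · simp only [List.foldl_nil, csFinish, hc, if_false, ite_false, totals_append, csScore]
      by_cases h : turns.length % 2 = 0 <;> simp [h]
  | cons r rs ih =>
    intro turns cur
    by_cases h : (PySem.Int.mod r 2 != 0) = true
    · have h2 : r % 2 = 1 := by
        have h' := h
        simp only [bne_iff_ne, ne_eq,
          PySem.Int.mod_eq_emod_of_pos (by norm_num : (0:Int) < 2)] at h'
        omega
      simp only [List.foldl_cons, csStepB, h, if_true, ite_true]
      rw [ih]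
      have hl : (turns ++ [cur ++ [r]]).length % 2 = (turns.length + 1) % 2 := by simp
      by_cases hp : turns.length % 2 = 0
      · have hp1 : (turns.length + 1) % 2 = 1 := by omega
        simp [totals_append, hp, hl, hp1, csScore, h2] <;> ring
      · have hp1 : (turns.length + 1) % 2 = 0 := by omega
        simp [totals_append, hp, hl, hp1, csScore, h2] <;> ring
    · have h2 : r % 2 = 0 := by
        have h' := h
        simp only [bne_iff_ne, ne_eq, not_not,
          PySem.Int.mod_eq_emod_of_pos (by norm_num : (0:Int) < 2)] at h'
        omega
      simp only [List.foldl_cons, csStepB, h, if_false, ite_false]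
      rw [ih]
      by_cases hp : turns.length % 2 = 0 <;>
        simp [hp, csScore, h2] <;> ring

-- ===== VERDICT (by name: the statement is the Claim_ definition above) =====
theorem cricket_score_spec : Claim_equal_cricket_score := by
  intro rs _
  have hA := foldA_eq rs 0 0 true
  simp only [if_true, zero_add, ite_true, eq_self_iff_true] at hA
  have hB := foldB_eq rs [] []
  simp only [csAltTotals, List.length_nil, Nat.zero_mod, List.sum_nil, zero_add,
    ite_true, eq_self_iff_true, if_true] at hB
  have e1 : (rs.foldl csStepA (0, 0, true)).1 = (csScore rs).1 := congrArg Prod.fst hA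
  have e2 : (rs.foldl csStepA (0, 0, true)).2.1 = (csScore rs).2 := congrArg Prod.snd hA
  unfold Spec_cricket_score
  show "p1: " ++ PySem.Int.toStr (rs.foldl csStepA (0, 0, true)).1
        ++ ", p2: " ++ PySem.Int.toStr (rs.foldl csStepA (0, 0, true)).2.1
      = "p1: " ++ PySem.Int.toStr (csAltTotals (csFinish (rs.foldl csStepB ([], [])))).1
        ++ ", p2: " ++ PySem.Int.toStr (csAltTotals (csFinish (rs.foldl csStepB ([], [])))).2
  rw [e1, e2, hB]
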